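-- pv_equiv track=rewrite | github.com/sebnaelizebath-sudo/DayFit | routes.py | detect_season
-- ===== SOURCE A (Python) =====
-- def detect_season(category, material="", pattern="", color=""):
--     """Smart season detection using category, material, pattern, and color."""
--     cat = (category or "").lower()
--     mat = (material or "").lower()
--     pat = (pattern or "").lower()
--     col = (color or "").lower()
--
--     # Winter
--     winter_materials = ["wool", "cashmere", "fleece", "thermal", "flannel"]
--     winter_cats = ["coat", "jacket", "sweater", "hoodie", "boots"]
--     if any(m in mat for m in winter_materials) or any(c in cat for c in winter_cats):
--         return "Winter"
--
--     # Rainy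
--     rainy_cats = ["raincoat", "umbrella", "waterproof"]
--     if any(c in cat for c in rainy_cats) or "waterproof" in mat:
--         return "Rainy"
--
--     # Summer
--     summer_materials = ["linen", "cotton", "seersucker", "poplin", "bamboo"]
--     summer_cats = ["shorts", "t-shirt", "tank top", "sundress", "sandals"]
--     summer_patterns = ["tropical", "gingham", "bold"]
--     if (
--         any(m in mat for m in summer_materials)
--         or any(c in cat for c in summer_cats)
--         or any(p in pat for p in summer_patterns)
--     ):
--         return "Summer"
--
--     # Versatile items → All Season
--     versatile_cats = [
--         "jeans",
--         "chinos",
--         "shirt",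
--         "blouse",
--         "skirt",
--         "dress",
--         "trousers",
--         "kurta",
--         "kurti",
--     ]
--     if any(c in cat for c in versatile_cats):
--         return "All Season"
--
--     return "Multi Season"
-- ===== SOURCE B (Python) =====
-- SEASONS = ("Winter", "Rainy", "Summer", "All Season", "Multi Season")
--
-- # Flat inverted keyword index: (keyword, field, priority).  Lower priority wins.
-- INDEX = [
--     ("wool", "material", 0), ("cashmere", "material", 0), ("fleece", "material", 0),
--     ("thermal", "material", 0), ("flannel", "material", 0),
--     ("coat", "category", 0), ("jacket", "category", 0), ("sweater", "category", 0),
--     ("hoodie", "category", 0), ("boots", "category", 0),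
--     ("raincoat", "category", 1), ("umbrella", "category", 1), ("waterproof", "category", 1),
--     ("waterproof", "material", 1),
--     ("linen", "material", 2), ("cotton", "material", 2), ("seersucker", "material", 2),
--     ("poplin", "material", 2), ("bamboo", "material", 2),
--     ("shorts", "category", 2), ("t-shirt", "category", 2), ("tank top", "category", 2),
--     ("sundress", "category", 2), ("sandals", "category", 2),
--     ("tropical", "pattern", 2), ("gingham", "pattern", 2), ("bold", "pattern", 2),
--     ("jeans", "category", 3), ("chinos", "category", 3), ("shirt", "category", 3),
--     ("blouse", "category", 3), ("skirt", "category", 3), ("dress", "category", 3),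
--     ("trousers", "category", 3), ("kurta", "category", 3), ("kurti", "category", 3),
-- ]
--
--
-- def detect_season(category, material="", pattern="", color=""):
--     """One pass over a flat keyword index, keeping the best (lowest) priority hit."""
--     fields = {"category": (category or "").lower(), "material": (material or "").lower(),
--               "pattern": (pattern or "").lower(), "color": (color or "").lower()}
--     best = len(SEASONS) - 1
--     for kw, field, pri in INDEX:
--         if kw in fields[field]:
--             best = min(best, pri)
--     return SEASONS[best]
-- ===== Notes on version B (the rewrite author's own statement) =====
-- stated objective: alternative
-- what changed: Replaced the early-return per-season if-cascade by a flat inverted keyword index of (keyword, field, priority) triples scanned in a single pass with a min-priority accumulator; the season name is read off a table at the end, with no per-season branches and no early exit.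
import Mathlib
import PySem

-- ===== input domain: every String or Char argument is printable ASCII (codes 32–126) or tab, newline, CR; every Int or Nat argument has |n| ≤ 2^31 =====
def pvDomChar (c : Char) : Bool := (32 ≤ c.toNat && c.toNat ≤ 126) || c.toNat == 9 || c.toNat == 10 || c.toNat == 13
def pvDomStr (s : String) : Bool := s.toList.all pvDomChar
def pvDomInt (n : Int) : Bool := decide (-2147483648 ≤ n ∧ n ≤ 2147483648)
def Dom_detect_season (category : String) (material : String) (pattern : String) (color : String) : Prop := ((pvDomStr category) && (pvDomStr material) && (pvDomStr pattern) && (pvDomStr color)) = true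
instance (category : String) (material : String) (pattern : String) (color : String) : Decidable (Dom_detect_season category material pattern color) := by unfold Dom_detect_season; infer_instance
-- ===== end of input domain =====

-- B replaces A's early-return priority cascade by a flat inverted keyword index scanned
-- in one pass with a min-priority accumulator (alternative decomposition, same cost).
-- ===== PORT A =====
def detect_season (category : String) (material : String) (pattern : String) (color : String) : String :=
  -- '(x or "")' is the identity on strings ('"" or ""' is ""), so it is .lower() of the argument
  let cat := PySem.Str.lower category
  let mat := PySem.Str.lower material
  let pat := PySem.Str.lower pattern
  let _col := PySem.Str.lower color
  let winter_materials := ["wool", "cashmere", "fleece", "thermal", "flannel"]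
  let winter_cats := ["coat", "jacket", "sweater", "hoodie", "boots"]
  if winter_materials.any (fun m => PySem.Str.isIn m mat) || winter_cats.any (fun c => PySem.Str.isIn c cat) then "Winter"
  else
    let rainy_cats := ["raincoat", "umbrella", "waterproof"]
    if rainy_cats.any (fun c => PySem.Str.isIn c cat) || PySem.Str.isIn "waterproof" mat then "Rainy"
    else
      let summer_materials := ["linen", "cotton", "seersucker", "poplin", "bamboo"]
      let summer_cats := ["shorts", "t-shirt", "tank top", "sundress", "sandals"]
      let summer_patterns := ["tropical", "gingham", "bold"]
      if summer_materials.any (fun m => PySem.Str.isIn m mat)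
          || summer_cats.any (fun c => PySem.Str.isIn c cat)
          || summer_patterns.any (fun p => PySem.Str.isIn p pat) then "Summer"
      else
        let versatile_cats := ["jeans", "chinos", "shirt", "blouse", "skirt", "dress", "trousers", "kurta", "kurti"]
        if versatile_cats.any (fun c => PySem.Str.isIn c cat) then "All Season"
        else "Multi Season"

-- ===== PORT B =====
def dsSeasons : List String := ["Winter", "Rainy", "Summer", "All Season", "Multi Season"]

-- Flat inverted keyword index: (keyword, field, priority).  Lower priority wins.
def dsIndex : List (String × String × Nat) :=
  [ ("wool", "material", 0), ("cashmere", "material", 0), ("fleece", "material", 0),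
    ("thermal", "material", 0), ("flannel", "material", 0),
    ("coat", "category", 0), ("jacket", "category", 0), ("sweater", "category", 0),
    ("hoodie", "category", 0), ("boots", "category", 0),
    ("raincoat", "category", 1), ("umbrella", "category", 1), ("waterproof", "category", 1),
    ("waterproof", "material", 1),
    ("linen", "material", 2), ("cotton", "material", 2), ("seersucker", "material", 2),
    ("poplin", "material", 2), ("bamboo", "material", 2),
    ("shorts", "category", 2), ("t-shirt", "category", 2), ("tank top", "category", 2),
    ("sundress", "category", 2), ("sandals", "category", 2),
    ("tropical", "pattern", 2), ("gingham", "pattern", 2), ("bold", "pattern", 2),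
    ("jeans", "category", 3), ("chinos", "category", 3), ("shirt", "category", 3),
    ("blouse", "category", 3), ("skirt", "category", 3), ("dress", "category", 3),
    ("trousers", "category", 3), ("kurta", "category", 3), ("kurti", "category", 3) ]

def detect_season_alt (category : String) (material : String) (pattern : String) (color : String) : String :=
  let fields : PySem.Dict String String :=
    ((((PySem.Dict.empty).insert "category" (PySem.Str.lower category)).insert
        "material" (PySem.Str.lower material)).insert
        "pattern" (PySem.Str.lower pattern)).insert "color" (PySem.Str.lower color)
  let best := dsIndex.foldl
    (fun b e => if PySem.Str.isIn e.1 (fields.getD e.2.1 "") then min b e.2.2 else b)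
    (dsSeasons.length - 1)
  -- SEASONS[best]: best < 5 always (it starts at 4 and only decreases), so getD is Python's indexing here
  dsSeasons.getD best ""

-- ===== PRECONDITION & SPEC =====
def Spec_detect_season (category : String) (material : String) (pattern : String) (color : String) (out : String) : Prop := out = detect_season_alt category material pattern color
instance (category : String) (material : String) (pattern : String) (color : String) (out : String) : Decidable (Spec_detect_season category material pattern color out) := by unfold Spec_detect_season; infer_instance

-- ===== CLAIM (what is proved, stated in full; the proofs are below) =====
def Claim_equal_detect_season : Prop := ∀ (category : String) (material : String) (pattern : String) (color : String), Dom_detect_season category material pattern color → Spec_detect_season category material pattern color (detect_season category material pattern color)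

-- ===== LEMMAS AND PROOFS =====
-- dsIndex split into its four constant-priority blocks (definitional)
def pvB0 : List (String × String × Nat) :=
  [("wool", "material", 0), ("cashmere", "material", 0), ("fleece", "material", 0),
    ("thermal", "material", 0), ("flannel", "material", 0),
    ("coat", "category", 0), ("jacket", "category", 0), ("sweater", "category", 0),
    ("hoodie", "category", 0), ("boots", "category", 0)]
def pvB1 : List (String × String × Nat) :=
  [("raincoat", "category", 1), ("umbrella", "category", 1), ("waterproof", "category", 1),
    ("waterproof", "material", 1)]
def pvB2 : List (String × String × Nat) :=
  [("linen", "material", 2), ("cotton", "material", 2), ("seersucker", "material", 2),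
    ("poplin", "material", 2), ("bamboo", "material", 2),
    ("shorts", "category", 2), ("t-shirt", "category", 2), ("tank top", "category", 2),
    ("sundress", "category", 2), ("sandals", "category", 2),
    ("tropical", "pattern", 2), ("gingham", "pattern", 2), ("bold", "pattern", 2)]
def pvB3 : List (String × String × Nat) :=
  [("jeans", "category", 3), ("chinos", "category", 3), ("shirt", "category", 3),
    ("blouse", "category", 3), ("skirt", "category", 3), ("dress", "category", 3),
    ("trousers", "category", 3), ("kurta", "category", 3), ("kurti", "category", 3)]

theorem pvIndexSplit : dsIndex = pvB0 ++ (pvB1 ++ (pvB2 ++ pvB3)) := rfl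

-- A block whose entries all carry priority k folds to 'min b k' iff some entry matches.
theorem pvFoldBlock (p : String × String × Nat → Bool) (k : Nat) :
    ∀ (l : List (String × String × Nat)) (b : Nat), (∀ e ∈ l, e.2.2 = k) →
      l.foldl (fun b e => if p e then min b e.2.2 else b) b
        = if l.any p then min b k else b := by
  intro l
  induction l with
  | nil => simp
  | cons e rest ih =>
    intro b h
    have he : e.2.2 = k := h e (List.mem_cons_self ..)
    have hrest : ∀ x ∈ rest, x.2.2 = k := fun x hx => h x (List.mem_cons_of_mem _ hx)
    cases hpe : p e with
    | false =>
      have ha : (e :: rest).any p = rest.any p := by simp [hpe]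
      rw [ha]
      simp only [List.foldl_cons]
      rw [if_neg (by simp [hpe]), ih b hrest]
    | true =>
      rw [List.foldl_cons]
      simp only [hpe, if_true, he]
      rw [ih (min b k) hrest]
      by_cases hr : rest.any p = true <;>
        simp [List.any_cons, hpe, hr]

theorem pvFields_getD (a b c d : String) (f : String)
    (hf : f = "category" ∨ f = "material" ∨ f = "pattern" ∨ f = "color") :
    (((((PySem.Dict.empty : PySem.Dict String String).insert "category" a).insert
        "material" b).insert "pattern" c).insert "color" d).getD f "" =
      (if f = "category" then a else if f = "material" then b else if f = "pattern" then c else d) := by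
  rcases hf with h | h | h | h <;> subst h <;>
    simp [PySem.Dict.getD, PySem.Dict.get?, PySem.Dict.insert, PySem.Dict.empty, PySem.Dict.contains]

-- ===== VERDICT (by name: the statement is the Claim_ definition above) =====
theorem detect_season_spec : Claim_equal_detect_season := by
  intro category material pattern color _
  unfold Spec_detect_season
  simp only [detect_season, detect_season_alt]
  rw [pvIndexSplit, List.foldl_append, List.foldl_append, List.foldl_append]
  rw [pvFoldBlock _ 0 pvB0 _ (by decide), pvFoldBlock _ 1 pvB1 _ (by decide),
      pvFoldBlock _ 2 pvB2 _ (by decide), pvFoldBlock _ 3 pvB3 _ (by decide)]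
  simp only [pvB0, pvB1, pvB2, pvB3, List.any_cons, List.any_nil,
    pvFields_getD _ _ _ _ "category" (by tauto),
    pvFields_getD _ _ _ _ "material" (by tauto),
    pvFields_getD _ _ _ _ "pattern" (by tauto)]
  simp only [if_neg (by decide : ("material" : String) = "category" → False),
    if_neg (by decide : ("pattern" : String) = "category" → False),
    if_neg (by decide : ("pattern" : String) = "material" → False)]
  simp only [Bool.or_false, Bool.or_assoc, dsSeasons]
  split_ifs <;> rfl
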